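-- pv_equiv track=rewrite | github.com/lsj1137/problem-solving | 프로그래머스/2/72412. 순위 검색/순위 검색.py | search
-- ===== SOURCE A (Python) =====
-- def search(db, query):
--     qCondition, qScore = query
--     result = 0
--     if qCondition not in db:
--         return result
--     sameConditions = db[qCondition]
--     start = 0
--     end = len(sameConditions)-1
--     while start<=end:
--         mid = (start+end)//2
--         if sameConditions[mid]<qScore:
--             start = mid+1
--         else:
--             end = mid-1
--     result=len(sameConditions)-start
--     return result
-- ===== SOURCE B (Python) =====
-- def search(db, query):
--     qCondition, qScore = query
--     if qCondition not in db:
--         return 0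
--     return sum(1 for s in db[qCondition] if s >= qScore)
-- ===== Notes on version B (the rewrite author's own statement) =====
-- stated objective: simpler
-- what changed: Replaces the hand-written binary search (which requires the score list to be sorted) with a direct single-pass count of scores >= threshold.
-- outside the precondition, e.g. on search({'a': [5, 1]}, ('a', 3)): A returns 2, B returns 1
import Mathlib
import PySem

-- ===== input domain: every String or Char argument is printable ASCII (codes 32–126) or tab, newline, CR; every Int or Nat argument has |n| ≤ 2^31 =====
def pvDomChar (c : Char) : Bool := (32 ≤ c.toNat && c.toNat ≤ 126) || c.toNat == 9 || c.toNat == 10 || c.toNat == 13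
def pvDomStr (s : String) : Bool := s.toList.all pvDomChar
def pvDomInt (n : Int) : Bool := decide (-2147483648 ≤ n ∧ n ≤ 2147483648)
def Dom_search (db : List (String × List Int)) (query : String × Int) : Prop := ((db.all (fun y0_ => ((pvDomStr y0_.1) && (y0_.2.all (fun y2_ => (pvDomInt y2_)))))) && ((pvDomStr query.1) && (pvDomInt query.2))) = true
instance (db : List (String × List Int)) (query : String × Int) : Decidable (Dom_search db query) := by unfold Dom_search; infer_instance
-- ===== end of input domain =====

-- B replaces A's hand-written binary search by a direct linear count of scores >= threshold (simpler, same values on sorted lists).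


-- ===== PORT A =====
-- the while loop: start/end shrink until start > end; returns the final `start`.
-- indexing: inside the reachable states mid is always in range, so the `.getD 0`
-- default of pyGetD is never taken (Python never raises here).
def searchLoop (xs : List Int) (q : Int) (start : Int) (end_ : Int) : Int :=
  if h : start ≤ end_ then
    let mid := PySem.Int.floordiv (start + end_) 2
    if PySem.List.pyGetD xs mid 0 < q then
      searchLoop xs q (mid + 1) end_
    else
      searchLoop xs q start (mid - 1)
  else start
termination_by (end_ + 1 - start).toNat
decreasing_by
  · have := PySem.Int.floordiv_two_mid_bounds h
    omega
  · have := PySem.Int.floordiv_two_mid_bounds h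
    omega

def search (db : List (String × List Int)) (query : String × Int) : Int :=
  let qCondition := query.1
  let qScore := query.2
  let result : Int := 0
  match (PySem.Dict.mk db).get? qCondition with
  | none => result
  | some sameConditions =>
    let start := searchLoop sameConditions qScore 0 ((sameConditions.length : Int) - 1)
    (sameConditions.length : Int) - start

-- ===== PORT B =====
def search_alt (db : List (String × List Int)) (query : String × Int) : Int :=
  match (PySem.Dict.mk db).get? query.1 with
  | none => 0
  | some xs => ((xs.filter (fun s => query.2 ≤ s)).length : Int)

-- ===== PRECONDITION & SPEC =====
-- Pre_ excludes inputs whose score list for the queried condition is not sorted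
-- ascending (binary search's precondition): there A's value is an accident of
-- element placement, not the count the function is for.  A is total.
def Pre_search (db : List (String × List Int)) (query : String × Int) : Prop :=
  (((PySem.Dict.mk db).get? query.1).getD []).Pairwise (· ≤ ·)
instance (db : List (String × List Int)) (query : String × Int) : Decidable (Pre_search db query) := by unfold Pre_search; infer_instance

def pvWitness_search : (List (String × List Int)) × (String × Int) :=
  ([("a", [1, 3, 3, 7])], ("a", 3))

def Spec_search (db : List (String × List Int)) (query : String × Int) (out : Int) : Prop := out = search_alt db query
instance (db : List (String × List Int)) (query : String × Int) (out : Int) : Decidable (Spec_search db query out) := by unfold Spec_search; infer_instance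

-- ===== CLAIM (what is proved, stated in full; the proofs are below) =====
def Claim_equal_search : Prop := ∀ (db : List (String × List Int)) (query : String × Int), Dom_search db query → Pre_search db query → Spec_search db query (search db query)

-- ===== LEMMAS AND PROOFS =====

-- the binary-search invariant: on a sorted list, the final `start` separates the
-- elements < q (strictly below it) from the elements ≥ q (at it and above).
lemma searchLoop_inv (xs : List Int) (q : Int) (hs : xs.Pairwise (· ≤ ·))
    (start end_ : Int) (h0 : 0 ≤ start) (hend : end_ ≤ (xs.length : Int) - 1)
    (hse : start ≤ end_ + 1)
    (hlo : ∀ i : Nat, (h : i < xs.length) → (i : Int) < start → xs[i] < q)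
    (hhi : ∀ i : Nat, (h : i < xs.length) → end_ < (i : Int) → ¬ xs[i] < q) :
    0 ≤ searchLoop xs q start end_ ∧ searchLoop xs q start end_ ≤ (xs.length : Int) ∧
    (∀ i : Nat, (h : i < xs.length) → (i : Int) < searchLoop xs q start end_ → xs[i] < q) ∧
    (∀ i : Nat, (h : i < xs.length) → searchLoop xs q start end_ ≤ (i : Int) → ¬ xs[i] < q) := by
  rw [searchLoop]
  by_cases h : start ≤ end_
  · simp only [h, dite_true]
    have hmid := PySem.Int.floordiv_two_mid_bounds h
    set mid := PySem.Int.floordiv (start + end_) 2 with hmiddef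
    have hmid0 : 0 ≤ mid := by omega
    have hmidlt : mid < (xs.length : Int) := by omega
    have hget : PySem.List.pyGetD xs mid 0 = xs[mid.toNat] :=
      PySem.List.pyGetD_eq_getElem xs 0 hmid0 hmidlt
    have hmidnat : (mid.toNat : Int) = mid := Int.toNat_of_nonneg hmid0
    have hpw := List.pairwise_iff_getElem.mp hs
    by_cases hc : PySem.List.pyGetD xs mid 0 < q
    · simp only [hc, if_true]
      apply searchLoop_inv xs q hs (mid + 1) end_ (by omega) hend (by omega)
      · intro i hi hilt
        rcases Int.lt_or_le (i : Int) start with h1 | h1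
        · exact hlo i hi h1
        · have hile : i ≤ mid.toNat := by omega
          rcases Nat.lt_or_ge i mid.toNat with h2 | h2
          · have := hpw i mid.toNat hi (by omega) h2
            rw [hget] at hc; omega
          · have hieq : i = mid.toNat := by omega
            subst hieq
            rw [hget] at hc; omega
      · exact hhi
    · simp only [hc, if_false]
      apply searchLoop_inv xs q hs start (mid - 1) h0 (by omega) (by omega) hlo
      intro i hi higt
      rcases Int.lt_or_le (end_ : Int) (i : Int) with h1 | h1
      · exact hhi i hi h1
      · have hge : mid.toNat ≤ i := by omega
        rcases Nat.lt_or_ge mid.toNat i with h2 | h2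
        · have := hpw mid.toNat i (by omega) hi h2
          rw [hget] at hc; omega
        · have hieq : i = mid.toNat := by omega
          subst hieq
          rw [hget] at hc; omega
  · simp only [h, dite_false]
    refine ⟨h0, by omega, fun i hi hilt => hlo i hi hilt, fun i hi hile => hhi i hi (by omega)⟩
termination_by (end_ + 1 - start).toNat
decreasing_by
  all_goals omega

-- if positions below n hold scores < q and positions from n hold scores >= q,
-- the >=-filter keeps exactly length - n elements
lemma filter_length_of_index_split (q : Int) (xs : List Int) (n : Nat) (hn : n ≤ xs.length)
    (h1 : ∀ i : Nat, (h : i < xs.length) → i < n → xs[i] < q)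
    (h2 : ∀ i : Nat, (h : i < xs.length) → n ≤ i → ¬ xs[i] < q) :
    (xs.filter (fun s => q ≤ s)).length = xs.length - n := by
  induction xs generalizing n with
  | nil => simp_all
  | cons x xs ih =>
    cases n with
    | zero =>
      have hx : q ≤ x := le_of_not_gt (h2 0 (by simp) (by omega))
      have := ih 0 (by omega)
        (fun i h hi => by omega)
        (fun i h hi => h2 (i + 1) (by simpa using Nat.succ_lt_succ h) (by omega))
      simp [hx, this]
    | succ m =>
      have hx : x < q := h1 0 (by simp) (by omega)
      have := ih m (by simpa using hn)
        (fun i h hi => h1 (i + 1) (by simpa using Nat.succ_lt_succ h) (by omega))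
        (fun i h hi => h2 (i + 1) (by simpa using Nat.succ_lt_succ h) (by omega))
      simp [hx, this, not_le.mpr]

-- ===== VERDICT (by name: the statement is the Claim_ definition above) =====
theorem search_spec : Claim_equal_search := by
  intro db query _hdom hpre
  unfold Spec_search search search_alt
  cases hget : (PySem.Dict.mk db).get? query.1 with
  | none => simp [hget]
  | some xs =>
    simp only [hget]
    have hs : xs.Pairwise (· ≤ ·) := by
      unfold Pre_search at hpre
      rw [hget] at hpre
      simpa using hpre
    obtain ⟨hr0, hrlen, hlo, hhi⟩ := searchLoop_inv xs query.2 hs 0 ((xs.length : Int) - 1)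
      le_rfl le_rfl (by omega)
      (fun i hi hilt => absurd hilt (by omega))
      (fun i hi higt => absurd higt (by omega))
    set r := searchLoop xs query.2 0 ((xs.length : Int) - 1) with hr
    have hfilter := filter_length_of_index_split query.2 xs r.toNat (by omega)
      (fun i hi hilt => hlo i hi (by omega))
      (fun i hi hile => hhi i hi (by omega))
    omega
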